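-- pv_equiv track=rewrite | github.com/robertofcfm/music-taxonomy | scripts/generar_canciones_con_genero.py | encontrar_genero_valido
-- ===== SOURCE A (Python) =====
-- def encontrar_genero_valido(genero, ramas):
--     if not genero:
--         return ''
--     partes = [p.strip() for p in genero.split('>')]
--     for i in range(len(partes), 0, -1):
--         rama = ' > '.join(partes[:i])
--         if rama in ramas:
--             return rama
--     return partes[0]  # fallback
-- ===== SOURCE B (Python) =====
-- def encontrar_genero_valido(genero, ramas):
--     if not genero:
--         return ''
--     partes = [p.strip() for p in genero.split('>')]
--     prefijo = partes[0]
--     mejor = prefijo if prefijo in ramas else None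
--     for parte in partes[1:]:
--         prefijo = prefijo + ' > ' + parte
--         if prefijo in ramas:
--             mejor = prefijo
--     return mejor if mejor is not None else partes[0]
-- ===== Notes on version B (the rewrite author's own statement) =====
-- stated objective: alternative
-- what changed: Replaces A's longest-first scan that re-joins every prefix slice from scratch and early-returns on the first hit with a single forward pass that extends the joined prefix incrementally and keeps the last (longest) match.
import Mathlib
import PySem

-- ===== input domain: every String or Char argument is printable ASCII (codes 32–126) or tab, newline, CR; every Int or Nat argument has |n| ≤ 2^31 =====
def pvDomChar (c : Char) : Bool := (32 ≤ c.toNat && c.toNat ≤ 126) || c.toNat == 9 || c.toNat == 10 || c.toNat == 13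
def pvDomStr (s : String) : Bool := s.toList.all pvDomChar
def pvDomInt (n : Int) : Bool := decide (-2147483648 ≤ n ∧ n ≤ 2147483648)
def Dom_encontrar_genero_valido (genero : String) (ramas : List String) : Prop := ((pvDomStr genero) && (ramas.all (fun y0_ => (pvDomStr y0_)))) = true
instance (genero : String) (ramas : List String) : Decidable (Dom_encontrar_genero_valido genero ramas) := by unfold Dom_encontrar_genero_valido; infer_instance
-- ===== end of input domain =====

-- B replaces A's longest-first scan over all prefixes (re-joining each slice from scratch)
-- with one forward pass extending the joined prefix incrementally and keeping the last match.

-- ===== PORT A =====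
-- the loop 'for i in range(len(partes), 0, -1): rama = " > ".join(partes[:i]); if rama in ramas: return rama'
def pvLoopA (partes ramas : List String) : Nat → Option String
  | 0 => none
  | i + 1 =>
      let rama := PySem.Str.join " > " (PySem.List.slice partes none (some ((i + 1 : Nat) : Int)))
      if ramas.contains rama then some rama else pvLoopA partes ramas i

def encontrar_genero_valido (genero : String) (ramas : List String) : String :=
  if genero == "" then ""
  else
    let partes := ((PySem.Str.split? genero ">").getD []).map PySem.Str.strip
    match pvLoopA partes ramas partes.length with
    | some rama => rama
    | none => (PySem.List.pyGet? partes 0).getD ""   -- partes[0]; split always yields ≥ 1 piece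

-- ===== PORT B =====
-- the loop 'for parte in partes[1:]: prefijo = prefijo + " > " + parte; if prefijo in ramas: mejor = prefijo'
def pvLoopB (ramas : List String) : List String → String × Option String → String × Option String
  | [], st => st
  | parte :: rest, (prefijo, mejor) =>
      let prefijo' := prefijo ++ " > " ++ parte
      pvLoopB ramas rest (prefijo', if ramas.contains prefijo' then some prefijo' else mejor)

def encontrar_genero_valido_alt (genero : String) (ramas : List String) : String :=
  if genero == "" then ""
  else
    let partes := ((PySem.Str.split? genero ">").getD []).map PySem.Str.strip
    match partes with
    | [] => ""   -- unreachable: split always yields ≥ 1 piece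
    | p0 :: ts =>
      let st := pvLoopB ramas ts (p0, if ramas.contains p0 then some p0 else none)
      match st.2 with
      | some mejor => mejor
      | none => p0

-- ===== PRECONDITION & SPEC =====
def Spec_encontrar_genero_valido (genero : String) (ramas : List String) (out : String) : Prop := out = encontrar_genero_valido_alt genero ramas
instance (genero : String) (ramas : List String) (out : String) : Decidable (Spec_encontrar_genero_valido genero ramas out) := by unfold Spec_encontrar_genero_valido; infer_instance

-- ===== CLAIM (what is proved, stated in full; the proofs are below) =====
def Claim_equal_encontrar_genero_valido : Prop := ∀ (genero : String) (ramas : List String), Dom_encontrar_genero_valido genero ramas → Spec_encontrar_genero_valido genero ramas (encontrar_genero_valido genero ramas)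

-- ===== LEMMAS AND PROOFS =====

-- " > ".join over a nonempty list extends on the right by " > " ++ x
theorem join_append_singleton (xs : List String) (x : String) (h : xs ≠ []) :
    PySem.Str.join " > " (xs ++ [x]) = PySem.Str.join " > " xs ++ " > " ++ x := by
  apply String.toList_inj.mp
  simp only [PySem.Str.toList_join, List.map_append, List.map_cons, List.map_nil,
    String.toList_append]
  induction xs with
  | nil => exact absurd rfl h
  | cons a tl ih =>
    cases tl with
    | nil => simp [PySem.Chars.join_singleton, PySem.Chars.join_cons_cons]
    | cons b tl' =>
      simp only [List.map_cons, List.cons_append, PySem.Chars.join_cons_cons] at ih ⊢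
      rw [ih (by simp)]
      simp

-- canonical descending best-prefix search, with take instead of slice
def pvBest (ramas partes : List String) : Nat → Option String
  | 0 => none
  | k + 1 =>
      let rama := PySem.Str.join " > " (partes.take (k + 1))
      if ramas.contains rama then some rama else pvBest ramas partes k

theorem pvLoopA_eq_pvBest (partes ramas : List String) (k : Nat) :
    pvLoopA partes ramas k = pvBest ramas partes k := by
  induction k with
  | zero => rfl
  | succ k ih =>
    have hs : PySem.List.slice partes none (some ((k + 1 : Nat) : Int)) = partes.take (k + 1) := by
      rw [PySem.List.slice_to _ (by positivity)]; simp
    simp only [pvLoopA, pvBest, ih, hs]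

theorem pvBest_append (ramas done ts : List String) (k : Nat) (hk : k ≤ done.length) :
    pvBest ramas (done ++ ts) k = pvBest ramas done k := by
  induction k with
  | zero => rfl
  | succ k ih =>
    simp only [pvBest, List.take_append_of_le_length hk, ih (Nat.le_of_succ_le hk)]

theorem pvLoopB_inv (ramas : List String) (ts : List String) :
    ∀ done : List String, done ≠ [] →
    pvLoopB ramas ts (PySem.Str.join " > " done, pvBest ramas done done.length)
      = (PySem.Str.join " > " (done ++ ts), pvBest ramas (done ++ ts) (done ++ ts).length) := by
  induction ts with
  | nil => intro done _; simp [pvLoopB]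
  | cons t rest ih =>
    intro done hdone
    have hjoin := join_append_singleton done t hdone
    have hstep : pvBest ramas (done ++ [t]) (done.length + 1)
        = if ramas.contains (PySem.Str.join " > " (done ++ [t]))
          then some (PySem.Str.join " > " (done ++ [t]))
          else pvBest ramas done done.length := by
      simp only [pvBest]
      rw [List.take_of_length_le (by simp), pvBest_append ramas done [t] done.length le_rfl]
    have := ih (done ++ [t]) (by simp)
    simp only [pvLoopB, ← hjoin, ← hstep, List.length_append, List.length_cons,
      List.length_nil, Nat.zero_add] at this ⊢
    rw [show done ++ t :: rest = (done ++ [t]) ++ rest by simp,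
      show done.length + (rest.length + 1) = done.length + 1 + rest.length by omega]
    exact this

-- ===== VERDICT (by name: the statement is the Claim_ definition above) =====
theorem encontrar_genero_valido_spec : Claim_equal_encontrar_genero_valido := by
  intro genero ramas _
  unfold Spec_encontrar_genero_valido encontrar_genero_valido encontrar_genero_valido_alt
  by_cases hg : genero == ""
  · simp [hg]
  · simp only [hg, if_false, Bool.false_eq_true]
    cases hp : ((PySem.Str.split? genero ">").getD []).map PySem.Str.strip with
    | nil => simp [pvLoopA, PySem.List.pyGet?]
    | cons p0 ts =>
      have h1 : PySem.Str.join " > " [p0] = p0 := by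
        apply String.toList_inj.mp
        simp [PySem.Str.toList_join, PySem.Chars.join_singleton]
      have h2 : pvBest ramas [p0] 1 = (if ramas.contains p0 then some p0 else none) := by
        simp [pvBest, h1]
      have hinv := pvLoopB_inv ramas ts [p0] (by simp)
      rw [h1, show ([p0] : List String).length = 1 from rfl, h2,
        List.singleton_append] at hinv
      have key : pvLoopA (p0 :: ts) ramas (p0 :: ts).length
          = (pvLoopB ramas ts (p0, if ramas.contains p0 then some p0 else none)).2 := by
        rw [pvLoopA_eq_pvBest, hinv]
      simp only [List.contains_eq_mem, decide_eq_true_eq] at key ⊢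
      rw [key]
      cases (pvLoopB ramas ts (p0, if p0 ∈ ramas then some p0 else none)).2 with
      | none => simp [PySem.List.pyGet?, PySem.List.pyIdx?]
      | some r => simp
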